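-- pv_equiv track=rewrite | github.com/m1sterzer0/DaveProgrammingCompetitions | hackercup/python/2016/qual_D.py | solve
-- ===== SOURCE A (Python) =====
-- def solve(N,K,S) :
--     myinf = 10**18
--     S.sort()
--     L = [len(S[i]) for i in range(N)]
--     pre = [[0]*N for _ in range(N)]
--     for i in range(N) :
--         for j in range(i+1,N) :
--             ia = 0
--             while ia < L[i] and ia < L[j] and S[i][ia] == S[j][ia] : ia += 1
--             pre[i][j] = pre[j][i] = ia
--     dp = [2*L[i] for i in range(N)]
--     ndp = [myinf] * N
--     for k in range(1,K) :
--         for i in range(N) : ndp[i] = myinf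
--         for i in range(N-1-k,-1,-1) :
--             for j in range(i+1,N) :
--                 ndp[i] = min(ndp[i],dp[j]+2*L[i]-2*pre[i][j])
--         ndp,dp = dp,ndp
--     ans = min(dp) + K ## Need to add in K print operations
--     return ans
-- ===== SOURCE B (Python) =====
-- def solve(N, K, S):
--     myinf = 10 ** 18
--     S.sort()
--     L = [len(s) for s in S[:N]]
--
--     def lcp(a, b):
--         p = 0
--         while p < len(a) and p < len(b) and a[p] == b[p]:
--             p += 1
--         return p
--
--     adj = [lcp(S[t], S[t + 1]) for t in range(N - 1)]
--
--     dp = [2 * l for l in L]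
--     last = N - 1
--     for k in range(1, K):
--         ndp = []
--         lim = N - 1 - k
--         for i in range(N):
--             v = myinf
--             if i <= lim:
--                 m = adj[i]
--                 base = 2 * L[i]
--                 for j in range(i + 1, N):
--                     t = dp[j] + base - 2 * m
--                     if t < v:
--                         v = t
--                     if j < last:
--                         a = adj[j]
--                         if a < m:
--                             m = a
--             ndp.append(v)
--         dp = ndp
--     return min(dp) + K
-- ===== Notes on version B (the rewrite author's own statement) =====
-- stated objective: alternative
-- what changed: B drops A's per-pair character-scan LCP table over all N^2 pairs: it computes only the N-1 adjacent LCPs of the sorted list and recovers every pre[i][j] as a running minimum of adjacent LCPs inside the dp inner loop (for sorted strings, LCP(i,j) is the minimum of the adjacent LCPs between them).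
import Mathlib
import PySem

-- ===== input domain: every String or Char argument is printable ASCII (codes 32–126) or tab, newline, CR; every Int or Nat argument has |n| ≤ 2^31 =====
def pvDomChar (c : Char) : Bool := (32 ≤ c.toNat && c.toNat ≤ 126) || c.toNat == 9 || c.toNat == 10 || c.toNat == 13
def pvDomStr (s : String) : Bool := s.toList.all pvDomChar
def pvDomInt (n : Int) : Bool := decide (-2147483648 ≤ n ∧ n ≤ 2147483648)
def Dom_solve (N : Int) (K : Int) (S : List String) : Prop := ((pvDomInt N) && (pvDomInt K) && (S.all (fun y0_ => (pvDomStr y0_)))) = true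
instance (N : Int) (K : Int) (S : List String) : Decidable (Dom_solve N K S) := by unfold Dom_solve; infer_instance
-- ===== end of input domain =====

-- B replaces A's per-pair character scan over all N^2 pairs by N-1 adjacent-LCP scans plus a
-- running minimum inside the dp inner loop (LCP of sorted strings = min of adjacent LCPs);
-- equivalence is about the RETURN value only (both Pythons sort S in place identically).

-- ===== PORT A =====
-- shared helper: the character-scan while loop 'while ia < len(a) and ia < len(b) and a[ia]==b[ia]: ia += 1'
-- ported as the obvious structural recursion on the two character lists (exact: same count)
def lcpLenC : List Char → List Char → Nat
  | a :: as, b :: bs => if a = b then lcpLenC as bs + 1 else 0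
  | _, _ => 0

-- pre[i][j] read / write (Python list-of-lists indexing; indices here are range outputs, hence ≥ 0)
def matGet (m : List (List Int)) (i j : Int) : Int :=
  PySem.List.pyGetD (PySem.List.pyGetD m i []) j 0

def matSet (m : List (List Int)) (i j : Int) (v : Int) : List (List Int) :=
  PySem.List.pySetD m i (PySem.List.pySetD (PySem.List.pyGetD m i []) j v)

def solve (N : Int) (K : Int) (S : List String) : Int :=
  let myinf : Int := 10 ^ 18
  let Ss := PySem.List.sorted S (fun x => x) false
  let L : List Int := (PySem.List.pyRange 0 N 1).map
      (fun i => PySem.Str.len (PySem.List.pyGetD Ss i ""))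
  let pre0 : List (List Int) := (PySem.List.pyRange 0 N 1).map
      (fun _ => List.replicate N.toNat (0 : Int))
  let pre := (PySem.List.pyRange 0 N 1).foldl (fun pre i =>
      (PySem.List.pyRange (i + 1) N 1).foldl (fun pre j =>
        let ia : Int := lcpLenC (PySem.List.pyGetD Ss i "").toList (PySem.List.pyGetD Ss j "").toList
        matSet (matSet pre i j ia) j i ia) pre) pre0
  let dp0 : List Int := (PySem.List.pyRange 0 N 1).map (fun i => 2 * PySem.List.pyGetD L i 0)
  let ndp0 : List Int := List.replicate N.toNat myinf
  let st := (PySem.List.pyRange 1 K 1).foldl (fun (st : List Int × List Int) k =>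
      let dp := st.1
      let ndp := st.2
      let ndp := (PySem.List.pyRange 0 N 1).foldl
          (fun ndp i => PySem.List.pySetD ndp i myinf) ndp
      let ndp := (PySem.List.pyRange (N - 1 - k) (-1) (-1)).foldl (fun ndp i =>
          (PySem.List.pyRange (i + 1) N 1).foldl (fun ndp j =>
            PySem.List.pySetD ndp i
              (min (PySem.List.pyGetD ndp i 0)
                   (PySem.List.pyGetD dp j 0 + 2 * PySem.List.pyGetD L i 0 - 2 * matGet pre i j))) ndp) ndp
      (ndp, dp)) (dp0, ndp0)
  ((PySem.List.min? st.1 (fun x => x)).getD 0) + K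

-- ===== PORT B =====
def solve_alt (N : Int) (K : Int) (S : List String) : Int :=
  let myinf : Int := 10 ^ 18
  let Ss := PySem.List.sorted S (fun x => x) false
  let L : List Int := (PySem.List.slice Ss none (some N)).map PySem.Str.len
  let adj : List Int := (PySem.List.pyRange 0 (N - 1) 1).map
      (fun t => (lcpLenC (PySem.List.pyGetD Ss t "").toList (PySem.List.pyGetD Ss (t + 1) "").toList : Int))
  let dp0 : List Int := L.map (fun l => 2 * l)
  let last := N - 1
  let dp := (PySem.List.pyRange 1 K 1).foldl (fun (dp : List Int) k =>
      let lim := N - 1 - k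
      (PySem.List.pyRange 0 N 1).foldl (fun ndp i =>
        let v : Int :=
          if i ≤ lim then
            let base := 2 * PySem.List.pyGetD L i 0
            ((PySem.List.pyRange (i + 1) N 1).foldl
              (fun (vm : Int × Int) j =>
                let t := PySem.List.pyGetD dp j 0 + base - 2 * vm.2
                (if t < vm.1 then t else vm.1,
                 if j < last then
                   (if PySem.List.pyGetD adj j 0 < vm.2 then PySem.List.pyGetD adj j 0 else vm.2)
                 else vm.2))
              (myinf, PySem.List.pyGetD adj i 0)).1
          else myinf
        ndp ++ [v]) []) dp0
  ((PySem.List.min? dp (fun x => x)).getD 0) + K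

-- ===== PRECONDITION & SPEC =====
-- Pre_ excludes exactly the inputs where the Python raises: N > len(S) is an IndexError in the
-- L comprehension, and N ≤ 0 leaves dp empty so min(dp) is a ValueError.
def Pre_solve (N : Int) (K : Int) (S : List String) : Prop :=
  1 ≤ N ∧ N ≤ (S.length : Int)
instance (N : Int) (K : Int) (S : List String) : Decidable (Pre_solve N K S) := by
  unfold Pre_solve; infer_instance

def pvWitness_solve : Int × Int × List String := (2, 2, ["ab", "ac"])

def Spec_solve (N : Int) (K : Int) (S : List String) (out : Int) : Prop := out = solve_alt N K S
instance (N : Int) (K : Int) (S : List String) (out : Int) : Decidable (Spec_solve N K S out) := by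
  unfold Spec_solve; infer_instance

-- ===== CLAIM (what is proved, stated in full; the proofs are below) =====
def Claim_equal_solve : Prop := ∀ (N : Int) (K : Int) (S : List String),
  Dom_solve N K S → Pre_solve N K S → Spec_solve N K S (solve N K S)


-- ===== LEMMAS AND PROOFS =====
-- ===== LEMMAS AND PROOFS =====

-- ---- generic list/int helpers ----

theorem pyGetD_nonneg' {α : Type} (xs : List α) (i : Int) (d : α) (h : 0 ≤ i) :
    PySem.List.pyGetD xs i d = xs.getD i.toNat d := by
  conv_lhs => rw [show i = ((i.toNat : Nat) : Int) from (Int.toNat_of_nonneg h).symm]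
  rw [PySem.List.pyGetD_natCast]

theorem getD_set_gen {α : Type} (xs : List α) (p q : Nat) (v : α) (d : α) (hp : p < xs.length) :
    (xs.set p v).getD q d = if q = p then v else xs.getD q d := by
  rcases Nat.lt_or_ge q xs.length with hq | hq
  · rw [List.getD_eq_getElem _ _ (by simpa using hq), List.getD_eq_getElem _ _ hq, List.getElem_set]
    split_ifs with h1 h2 h3 <;> first | rfl | omega
  · have h1 : q ≠ p := by omega
    rw [if_neg h1, List.getD_eq_default _ _ (by simpa using hq), List.getD_eq_default _ _ hq]

theorem foldl_rel {α β γ : Type} (R : α → β → Prop) (f : α → γ → α) (g : β → γ → β) :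
    ∀ (l : List γ) (a : α) (b : β), R a b →
      (∀ x ∈ l, ∀ a b, R a b → R (f a x) (g b x)) → R (l.foldl f a) (l.foldl g b) := by
  intro l
  induction l with
  | nil => intro a b hR _; exact hR
  | cons x xs ih =>
    intro a b hR hstep
    exact ih _ _ (hstep x (by simp) a b hR) (fun y hy => hstep y (by simp [hy]))

-- ---- LCP lemmas ----

theorem lcpLenC_comm (a b : List Char) : lcpLenC a b = lcpLenC b a := by
  induction a generalizing b with
  | nil => cases b <;> rfl
  | cons x as ih =>
    cases b with
    | nil => rfl
    | cons y bs =>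
      simp only [lcpLenC]
      by_cases h : x = y
      · subst h; simp [ih]
      · rw [if_neg h, if_neg (fun hy : y = x => h hy.symm)]

theorem le_cons_cases {x y : Char} {a b : List Char}
    (h : (x :: a : List Char) ≤ y :: b) : x < y ∨ (x = y ∧ a ≤ b) := by
  rw [← Std.not_lt, List.cons_lt_cons_iff] at h
  rcases lt_trichotomy x y with h1 | h1 | h1
  · exact Or.inl h1
  · refine Or.inr ⟨h1, ?_⟩
    rw [← Std.not_lt]
    intro hba
    exact h (Or.inr ⟨h1.symm, hba⟩)
  · exact absurd (Or.inl h1) h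

theorem not_cons_le_nil {x : Char} {a : List Char} : ¬ ((x :: a : List Char) ≤ []) := by
  rw [← Std.not_lt, not_not]
  exact List.nil_lt_cons x a

-- for sorted a ≤ b ≤ c the LCP of the outer pair is the min of the two adjacent LCPs
theorem lcp_min (a b c : List Char) (hab : a ≤ b) (hbc : b ≤ c) :
    lcpLenC a c = min (lcpLenC a b) (lcpLenC b c) := by
  induction a generalizing b c with
  | nil => cases c <;> simp [lcpLenC]
  | cons x as ih =>
    cases b with
    | nil => exact absurd hab not_cons_le_nil
    | cons y bs =>
      cases c with
      | nil => exact absurd hbc not_cons_le_nil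
      | cons z cs =>
        rcases le_cons_cases hab with hxy | ⟨hxy, htail⟩
        · have hyz : y ≤ z := by
            rcases le_cons_cases hbc with h | ⟨h, _⟩
            · exact le_of_lt h
            · exact le_of_eq h
          have hxz : x ≠ z := ne_of_lt (lt_of_lt_of_le hxy hyz)
          simp [lcpLenC, hxz, ne_of_lt hxy]
        · subst hxy
          rcases le_cons_cases hbc with hyz | ⟨hyz, htail2⟩
          · have hxz : x ≠ z := ne_of_lt hyz
            simp [lcpLenC, hxz]
          · subst hyz
            simp only [lcpLenC, if_true, ih bs cs htail htail2]
            omega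

-- ---- pre-matrix characterization ----

def natGet (m : List (List Int)) (p q : Nat) : Int := (m.getD p []).getD q 0

def Shape (m : List (List Int)) (n : Nat) : Prop := m.length = n ∧ ∀ r ∈ m, r.length = n

theorem matGet_eq_natGet (m : List (List Int)) (i j : Int) (hi : 0 ≤ i) (hj : 0 ≤ j) :
    matGet m i j = natGet m i.toNat j.toNat := by
  rw [matGet, natGet, pyGetD_nonneg' _ _ _ hi, pyGetD_nonneg' _ _ _ hj]

theorem row_pyGetD {m : List (List Int)} {n : Nat} (h : Shape m n) (i : Int)
    (hi : 0 ≤ i) (hin : i.toNat < n) :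
    PySem.List.pyGetD m i [] = m[i.toNat]'(by have := h.1; omega) := by
  rw [pyGetD_nonneg' _ _ _ hi, List.getD_eq_getElem _ _ (by have := h.1; omega)]

theorem shape_matSet {m : List (List Int)} {n : Nat} (h : Shape m n) (i j : Int) (v : Int)
    (hi : 0 ≤ i) (hj : 0 ≤ j) (hin : i.toNat < n) : Shape (matSet m i j v) n := by
  have hrlen : (PySem.List.pyGetD m i []).length = n := by
    rw [row_pyGetD h i hi hin]; exact h.2 _ (List.getElem_mem _)
  refine ⟨by simp [matSet, PySem.List.length_pySetD, h.1], ?_⟩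
  intro r hr
  rw [matSet, PySem.List.pySetD_of_nonneg _ _ hi] at hr
  rcases List.mem_or_eq_of_mem_set hr with hmem | heq
  · exact h.2 r hmem
  · subst heq
    rw [PySem.List.pySetD_of_nonneg _ _ hj, List.length_set]
    exact hrlen

theorem natGet_matSet {m : List (List Int)} {n : Nat} (h : Shape m n) (i j : Int) (v : Int)
    (hi : 0 ≤ i) (hj : 0 ≤ j) (hin : i.toNat < n) (hjn : j.toNat < n) (p q : Nat)
    (_hp : p < n) (_hq : q < n) :
    natGet (matSet m i j v) p q = if p = i.toNat ∧ q = j.toNat then v else natGet m p q := by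
  have hrlen : (PySem.List.pyGetD m i []).length = n := by
    rw [row_pyGetD h i hi hin]; exact h.2 _ (List.getElem_mem _)
  rw [natGet, matSet, PySem.List.pySetD_of_nonneg _ _ hi, PySem.List.pySetD_of_nonneg _ _ hj,
    getD_set_gen _ _ _ _ _ (by have := h.1; omega)]
  by_cases hpi : p = i.toNat
  · rw [if_pos hpi, getD_set_gen _ _ _ _ _ (by omega)]
    by_cases hqj : q = j.toNat
    · simp [hqj, hpi]
    · rw [if_neg hqj, if_neg (by tauto), natGet, hpi, pyGetD_nonneg' _ _ _ hi]
  · rw [if_neg hpi, if_neg (by tauto), natGet]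

theorem inner_fold (G : Int → Int → Int) (N : Int) (r : Int) (hr0 : 0 ≤ r) (hrN : r < N) :
    ∀ (fuel : Nat) (t : Int) (m : List (List Int)), (N - t).toNat ≤ fuel → r < t → Shape m N.toNat →
    Shape ((PySem.List.pyRange t N 1).foldl
        (fun m j => matSet (matSet m r j (G r j)) j r (G r j)) m) N.toNat ∧
    ∀ p q : Nat, p < N.toNat → q < N.toNat →
      natGet ((PySem.List.pyRange t N 1).foldl
        (fun m j => matSet (matSet m r j (G r j)) j r (G r j)) m) p q =
      if p = r.toNat ∧ t ≤ (q : Int) then G r q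
      else if q = r.toNat ∧ t ≤ (p : Int) then G r p
      else natGet m p q := by
  intro fuel
  induction fuel with
  | zero =>
    intro t m hfuel ht hm
    rw [PySem.List.pyRange_one_eq_nil (by omega)]
    refine ⟨hm, ?_⟩
    intro p q hp hq
    rw [List.foldl_nil, if_neg (by omega), if_neg (by omega)]
  | succ fuel ih =>
    intro t m hfuel ht hm
    rcases Int.lt_or_le t N with htN | htN
    · rw [PySem.List.pyRange_one_cons (by omega), List.foldl_cons]
      have ht0 : 0 ≤ t := by omega
      have hm1 : Shape (matSet m r t (G r t)) N.toNat :=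
        shape_matSet hm _ _ _ hr0 ht0 (by omega)
      have hm2 : Shape (matSet (matSet m r t (G r t)) t r (G r t)) N.toNat :=
        shape_matSet hm1 _ _ _ ht0 hr0 (by omega)
      obtain ⟨hsh, hget⟩ := ih (t + 1) _ (by omega) (by omega) hm2
      refine ⟨hsh, ?_⟩
      intro p q hp hq
      rw [hget p q hp hq,
        natGet_matSet hm1 _ _ _ ht0 hr0 (by omega) (by omega) p q hp hq,
        natGet_matSet hm _ _ _ hr0 ht0 (by omega) (by omega) p q hp hq]
      by_cases h1 : p = r.toNat ∧ t + 1 ≤ (q : Int)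
      · rw [if_pos h1, if_pos ⟨h1.1, by omega⟩]
      · rw [if_neg h1]
        by_cases h2 : q = r.toNat ∧ t + 1 ≤ (p : Int)
        · rw [if_pos h2, if_neg (by omega), if_pos ⟨h2.1, by omega⟩]
        · rw [if_neg h2]
          by_cases h3 : p = t.toNat ∧ q = r.toNat
          · rw [if_pos h3, if_neg (by omega), if_pos ⟨h3.2, by omega⟩]
            congr 1
            omega
          · rw [if_neg h3]
            by_cases h4 : p = r.toNat ∧ q = t.toNat
            · rw [if_pos h4, if_pos ⟨h4.1, by omega⟩]
              congr 1
              omega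
            · rw [if_neg h4, if_neg (by omega), if_neg (by omega)]
    · rw [PySem.List.pyRange_one_eq_nil (by omega)]
      refine ⟨hm, ?_⟩
      intro p q hp hq
      rw [List.foldl_nil, if_neg (by omega), if_neg (by omega)]

theorem outer_fold (G : Int → Int → Int) (N : Int)
    (hGsym : ∀ i j : Int, G i j = G j i) :
    ∀ (fuel : Nat) (r : Int) (m : List (List Int)), (N - r).toNat ≤ fuel → 0 ≤ r →
    Shape m N.toNat →
    (∀ p q : Nat, p < N.toNat → q < N.toNat → p ≠ q → ((min p q : Nat) : Int) < r →
        natGet m p q = G p q) →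
    Shape ((PySem.List.pyRange r N 1).foldl (fun m i =>
        (PySem.List.pyRange (i + 1) N 1).foldl
          (fun m j => matSet (matSet m i j (G i j)) j i (G i j)) m) m) N.toNat ∧
    ∀ p q : Nat, p < N.toNat → q < N.toNat → p ≠ q →
      natGet ((PySem.List.pyRange r N 1).foldl (fun m i =>
        (PySem.List.pyRange (i + 1) N 1).foldl
          (fun m j => matSet (matSet m i j (G i j)) j i (G i j)) m) m) p q = G p q := by
  intro fuel
  induction fuel with
  | zero =>
    intro r m hfuel hr0 hm hinv
    rw [PySem.List.pyRange_one_eq_nil (by omega), List.foldl_nil]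
    exact ⟨hm, fun p q hp hq hne => hinv p q hp hq hne (by omega)⟩
  | succ fuel ih =>
    intro r m hfuel hr0 hm hinv
    rcases Int.lt_or_le r N with hrN | hrN
    · rw [PySem.List.pyRange_one_cons (by omega), List.foldl_cons]
      obtain ⟨hsh1, hget1⟩ := inner_fold G N r hr0 hrN ((N - (r + 1)).toNat) (r + 1) m
        (le_refl _) (by omega) hm
      refine ih (r + 1) _ (by omega) (by omega) hsh1 ?_
      intro p q hp hq hne hmin
      rw [hget1 p q hp hq]
      by_cases h1 : p = r.toNat ∧ r + 1 ≤ (q : Int)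
      · rw [if_pos h1]
        congr 1
        omega
      · rw [if_neg h1]
        by_cases h2 : q = r.toNat ∧ r + 1 ≤ (p : Int)
        · rw [if_pos h2, hGsym]
          congr 1
          omega
        · rw [if_neg h2]
          exact hinv p q hp hq hne (by omega)
    · rw [PySem.List.pyRange_one_eq_nil (by omega), List.foldl_nil]
      exact ⟨hm, fun p q hp hq hne => hinv p q hp hq hne (by omega)⟩

-- ---- dp-phase loop lemmas ----

-- 'for i in range(a, len(l)): l[i] = c' fills the tail with c
theorem reset_char (c : Int) (N : Int) :
    ∀ (fuel : Nat) (a : Int) (l : List Int), (N - a).toNat ≤ fuel → 0 ≤ a →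
      l.length = N.toNat →
      ((PySem.List.pyRange a N 1).foldl (fun l i => PySem.List.pySetD l i c) l).length = N.toNat ∧
      ∀ idx : Nat, idx < N.toNat →
        ((PySem.List.pyRange a N 1).foldl (fun l i => PySem.List.pySetD l i c) l).getD idx 0 =
          if a ≤ (idx : Int) then c else l.getD idx 0 := by
  intro fuel
  induction fuel with
  | zero =>
    intro a l hfuel ha hl
    rw [PySem.List.pyRange_one_eq_nil (by omega)]
    exact ⟨hl, fun idx hidx => by rw [List.foldl_nil, if_neg (by omega)]⟩
  | succ fuel ih =>
    intro a l hfuel ha hl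
    rcases Int.lt_or_le a N with haN | haN
    · rw [PySem.List.pyRange_one_cons (by omega), List.foldl_cons]
      have hl1 : (PySem.List.pySetD l a c).length = N.toNat := by
        rw [PySem.List.length_pySetD]; exact hl
      obtain ⟨hsh, hget⟩ := ih (a + 1) _ (by omega) (by omega) hl1
      refine ⟨hsh, ?_⟩
      intro idx hidx
      rw [hget idx hidx]
      by_cases h1 : a + 1 ≤ (idx : Int)
      · rw [if_pos h1, if_pos (by omega)]
      · rw [if_neg h1]
        rw [PySem.List.pySetD_of_nonneg _ _ ha, getD_set_gen _ _ _ _ _ (by omega)]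
        by_cases h2 : a ≤ (idx : Int)
        · rw [if_pos h2, if_pos (by omega)]
        · rw [if_neg h2, if_neg (by omega)]
    · rw [PySem.List.pyRange_one_eq_nil (by omega)]
      exact ⟨hl, fun idx hidx => by rw [List.foldl_nil, if_neg (by omega)]⟩

-- a j-loop that only reads and writes slot i is one write of the accumulated min
theorem fold_set_single (e : Int → Int) (N : Int) (i : Int) (hi : 0 ≤ i) :
    ∀ (fuel : Nat) (t : Int) (ndp : List Int), (N - t).toNat ≤ fuel → i.toNat < ndp.length →
      (PySem.List.pyRange t N 1).foldl
          (fun ndp j => PySem.List.pySetD ndp i (min (PySem.List.pyGetD ndp i 0) (e j))) ndp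
        = PySem.List.pySetD ndp i
            ((PySem.List.pyRange t N 1).foldl (fun v j => min v (e j)) (PySem.List.pyGetD ndp i 0)) := by
  intro fuel
  induction fuel with
  | zero =>
    intro t ndp hfuel hlen
    rw [PySem.List.pyRange_one_eq_nil (by omega), List.foldl_nil, List.foldl_nil,
      PySem.List.pySetD_of_nonneg _ _ hi, pyGetD_nonneg' _ _ _ hi,
      List.getD_eq_getElem _ _ hlen, List.set_getElem_self]
  | succ fuel ih =>
    intro t ndp hfuel hlen
    rcases Int.lt_or_le t N with htN | htN
    · rw [PySem.List.pyRange_one_cons (by omega), List.foldl_cons, List.foldl_cons]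
      rw [ih (t + 1) _ (by omega) (by rw [PySem.List.length_pySetD]; exact hlen)]
      have hread : PySem.List.pyGetD
          (PySem.List.pySetD ndp i (min (PySem.List.pyGetD ndp i 0) (e t))) i 0
          = min (PySem.List.pyGetD ndp i 0) (e t) := by
        rw [PySem.List.pySetD_of_nonneg _ _ hi, pyGetD_nonneg' _ _ _ hi,
          getD_set_gen _ _ _ _ _ hlen, if_pos rfl]
      rw [hread, PySem.List.pySetD_of_nonneg _ _ hi, PySem.List.pySetD_of_nonneg _ _ hi,
        PySem.List.pySetD_of_nonneg _ _ hi, List.set_set]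
    · rw [PySem.List.pyRange_one_eq_nil (by omega), List.foldl_nil, List.foldl_nil,
        PySem.List.pySetD_of_nonneg _ _ hi, pyGetD_nonneg' _ _ _ hi,
        List.getD_eq_getElem _ _ hlen, List.set_getElem_self]

-- the descending i-loop writes each slot once, from a value read as myinf
theorem desc_char (N a0 : Int) (E : Int → Int → Int) (ha0N : a0 < N) :
    ∀ (fuel : Nat) (a : Int) (ndp : List Int), (a + 1).toNat ≤ fuel → a ≤ a0 →
      ndp.length = N.toNat →
      (∀ idx : Nat, idx < N.toNat → ndp.getD idx 0 =
        if a < (idx : Int) then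
          (if (idx : Int) ≤ a0 then
            (PySem.List.pyRange ((idx : Int) + 1) N 1).foldl
              (fun v j => min v (E idx j)) (10 ^ 18 : Int)
          else (10 ^ 18 : Int))
        else (10 ^ 18 : Int)) →
      ((PySem.List.pyRange a (-1) (-1)).foldl (fun ndp i =>
          (PySem.List.pyRange (i + 1) N 1).foldl
            (fun ndp j => PySem.List.pySetD ndp i
              (min (PySem.List.pyGetD ndp i 0) (E i j))) ndp) ndp).length = N.toNat ∧
      ∀ idx : Nat, idx < N.toNat →
        ((PySem.List.pyRange a (-1) (-1)).foldl (fun ndp i =>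
          (PySem.List.pyRange (i + 1) N 1).foldl
            (fun ndp j => PySem.List.pySetD ndp i
              (min (PySem.List.pyGetD ndp i 0) (E i j))) ndp) ndp).getD idx 0 =
        (if (idx : Int) ≤ a0 then
            (PySem.List.pyRange ((idx : Int) + 1) N 1).foldl
              (fun v j => min v (E idx j)) (10 ^ 18 : Int)
          else (10 ^ 18 : Int)) := by
  intro fuel
  induction fuel with
  | zero =>
    intro a ndp hfuel ha hlen hinv
    rw [PySem.List.pyRange_neg_one_eq_nil (by omega)]
    refine ⟨by rw [List.foldl_nil]; exact hlen, ?_⟩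
    intro idx hidx
    rw [List.foldl_nil, hinv idx hidx, if_pos (by omega)]
  | succ fuel ih =>
    intro a ndp hfuel ha hlen hinv
    rcases Int.lt_or_le a 0 with ha0 | ha0
    · rw [PySem.List.pyRange_neg_one_eq_nil (by omega)]
      refine ⟨by rw [List.foldl_nil]; exact hlen, ?_⟩
      intro idx hidx
      rw [List.foldl_nil, hinv idx hidx, if_pos (by omega)]
    · rw [PySem.List.pyRange_neg_one_cons (by omega), List.foldl_cons]
      have hread : PySem.List.pyGetD ndp a 0 = (10 ^ 18 : Int) := by
        rw [pyGetD_nonneg' _ _ _ ha0, hinv a.toNat (by omega)]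
        rw [if_neg (by omega)]
      have hstep : (PySem.List.pyRange (a + 1) N 1).foldl
            (fun ndp j => PySem.List.pySetD ndp a
              (min (PySem.List.pyGetD ndp a 0) (E a j))) ndp
          = PySem.List.pySetD ndp a
              ((PySem.List.pyRange (a + 1) N 1).foldl (fun v j => min v (E a j))
                (PySem.List.pyGetD ndp a 0)) :=
        fold_set_single (E a) N a ha0 ((N - (a + 1)).toNat) (a + 1) ndp (le_refl _) (by omega)
      rw [hstep, hread]
      refine ih (a - 1) _ (by omega) (by omega)
        (by rw [PySem.List.length_pySetD]; exact hlen) ?_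
      intro idx hidx
      rw [PySem.List.pySetD_of_nonneg _ _ ha0, getD_set_gen _ _ _ _ _ (by omega)]
      by_cases hia : idx = a.toNat
      · have hidxa : ((idx : Nat) : Int) = a := by omega
        rw [if_pos hia, hidxa, if_pos (show a - 1 < a by omega), if_pos ha]
      · rw [if_neg hia, hinv idx hidx]
        by_cases h1 : a < (idx : Int)
        · rw [if_pos h1, if_pos (show a - 1 < (idx : Int) by omega)]
        · rw [if_neg h1, if_neg (show ¬ (a - 1 < (idx : Int)) by omega)]

-- B's running minimum vm.2 equals A's precomputed LCP pre[i][j] throughout the j-loop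
theorem inner_AB (N i : Int) (c g a : Int → Int) (G : Int → Int → Int)
    (hg : ∀ j : Int, i < j → j < N → g j = G i j)
    (ha : ∀ t : Int, i < t → t + 1 < N → a t = G t (t + 1))
    (hstep : ∀ t : Int, i < t → t + 1 < N → min (G i t) (G t (t + 1)) = G i (t + 1)) :
    ∀ (fuel : Nat) (t : Int) (v m : Int), (N - t).toNat ≤ fuel → i < t → (t < N → m = G i t) →
      ((PySem.List.pyRange t N 1).foldl
          (fun (vm : Int × Int) j =>
            (if c j - 2 * vm.2 < vm.1 then c j - 2 * vm.2 else vm.1,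
             if j < N - 1 then (if a j < vm.2 then a j else vm.2) else vm.2))
          (v, m)).1
        = (PySem.List.pyRange t N 1).foldl (fun v j => min v (c j - 2 * g j)) v := by
  intro fuel
  induction fuel with
  | zero =>
    intro t v m hfuel ht hm
    rw [PySem.List.pyRange_one_eq_nil (by omega), List.foldl_nil, List.foldl_nil]
  | succ fuel ih =>
    intro t v m hfuel ht hm
    rcases Int.lt_or_le t N with htN | htN
    · rw [PySem.List.pyRange_one_cons (by omega), List.foldl_cons, List.foldl_cons]
      dsimp only
      have hmG : m = G i t := hm htN
      have hv : (if c t - 2 * m < v then c t - 2 * m else v) = min v (c t - 2 * g t) := by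
        rw [hmG, hg t ht htN, min_def]
        split_ifs <;> omega
      rcases Int.lt_or_le t (N - 1) with htN1 | htN1
      · rw [if_pos htN1]
        have hm' : (if a t < m then a t else m) = G i (t + 1) := by
          rw [hmG, ha t ht (by omega), ← hstep t ht (by omega), min_def]
          split_ifs <;> omega
        rw [show ((if c t - 2 * m < v then c t - 2 * m else v),
              (if a t < m then a t else m)) =
            ((min v (c t - 2 * g t) : Int), (G i (t + 1) : Int)) by rw [hv, hm']]
        exact ih (t + 1) _ _ (by omega) (by omega) (fun _ => rfl)
      · rw [if_neg (show ¬ (t < N - 1) by omega)]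
        rw [show ((if c t - 2 * m < v then c t - 2 * m else v), m) =
            ((min v (c t - 2 * g t) : Int), m) by rw [hv]]
        exact ih (t + 1) _ _ (by omega) (by omega) (fun h => absurd h (by omega))
    · rw [PySem.List.pyRange_one_eq_nil (by omega), List.foldl_nil, List.foldl_nil]

-- sorted strings: the LCP running minimum absorbs one more adjacent LCP
theorem sorted_lcp_step (S : List String) (N : Int) (hNlen : N ≤ (S.length : Int))
    (i t : Int) (hi : 0 ≤ i) (hit : i < t) (htN : t + 1 < N) :
    min ((lcpLenC (PySem.List.pyGetD (PySem.List.sorted S (fun x => x) false) i "").toList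
            (PySem.List.pyGetD (PySem.List.sorted S (fun x => x) false) t "").toList : Nat) : Int)
        ((lcpLenC (PySem.List.pyGetD (PySem.List.sorted S (fun x => x) false) t "").toList
            (PySem.List.pyGetD (PySem.List.sorted S (fun x => x) false) (t + 1) "").toList : Nat) : Int)
      = ((lcpLenC (PySem.List.pyGetD (PySem.List.sorted S (fun x => x) false) i "").toList
            (PySem.List.pyGetD (PySem.List.sorted S (fun x => x) false) (t + 1) "").toList : Nat) : Int) := by
  have hlen : (PySem.List.sorted S (fun x => x) false).length = S.length :=
    PySem.List.length_sorted S (fun x => x) false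
  have hi' : i < ((PySem.List.sorted S (fun x => x) false).length : Int) := by omega
  have ht' : t < ((PySem.List.sorted S (fun x => x) false).length : Int) := by omega
  have ht1' : t + 1 < ((PySem.List.sorted S (fun x => x) false).length : Int) := by omega
  rw [PySem.List.pyGetD_eq_getElem _ "" hi hi',
      PySem.List.pyGetD_eq_getElem _ "" (by omega) ht',
      PySem.List.pyGetD_eq_getElem _ "" (by omega) ht1']
  have hab : (PySem.List.sorted S (fun x => x) false)[i.toNat]'(by omega) ≤
      (PySem.List.sorted S (fun x => x) false)[t.toNat]'(by omega) :=
    PySem.List.key_sorted_getElem_mono S (fun x => x) (by omega) (by omega)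
  have hbc : (PySem.List.sorted S (fun x => x) false)[t.toNat]'(by omega) ≤
      (PySem.List.sorted S (fun x => x) false)[(t + 1).toNat]'(by omega) :=
    PySem.List.key_sorted_getElem_mono S (fun x => x) (by omega) (by omega)
  rw [lcp_min _ _ _ (String.le_iff_toList_le.mp hab) (String.le_iff_toList_le.mp hbc)]
  exact (Nat.cast_min (α := Int) _ _).symm

-- '[f(xs[i]) for i in range(N)]' is 'map f (take N xs)' when N ≤ len(xs)
theorem map_pyRange_getD_eq_map_take {α β : Type} (xs : List α) (f : α → β) (d : α)
    (N : Int) (h0 : 0 ≤ N) (hN : N ≤ (xs.length : Int)) :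
    (PySem.List.pyRange 0 N 1).map (fun i => f (PySem.List.pyGetD xs i d)) =
      (xs.take N.toNat).map f := by
  have hr := PySem.List.length_pyRange_one (a := 0) (b := N)
  apply List.ext_getElem
  · simp only [List.length_map, List.length_take, hr]
    omega
  · intro k h1 h2
    have h1' : k < (N - 0).toNat := by simpa [List.length_map, hr] using h1
    rw [List.getElem_map, List.getElem_map, List.getElem_take,
      PySem.List.getElem_pyRange_one 0 N k (by simpa [hr] using h1'), zero_add,
      PySem.List.pyGetD_eq_getElem _ d (by omega) (by omega)]
    simp

-- '[2*L[i] for i in range(N)]' is 'map (2*·) L' when len(L) = N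
theorem map_pyRange_getD_eq_map_double (L : List Int) (N : Int) (h0 : 0 ≤ N)
    (hlen : L.length = N.toNat) :
    (PySem.List.pyRange 0 N 1).map (fun i => 2 * PySem.List.pyGetD L i 0) =
      L.map (fun l => 2 * l) := by
  have hr := PySem.List.length_pyRange_one (a := 0) (b := N)
  apply List.ext_getElem
  · simp only [List.length_map, hr, hlen]
    omega
  · intro k h1 h2
    have h1' : k < (N - 0).toNat := by simpa [List.length_map, hr] using h1
    rw [List.getElem_map, List.getElem_map,
      PySem.List.getElem_pyRange_one 0 N k (by simpa [hr] using h1'), zero_add,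
      PySem.List.pyGetD_eq_getElem _ 0 (by omega) (by omega)]
    simp

-- the whole dp phase: A's in-place two-buffer loop equals B's rebuilt-list loop
theorem core_eq (N K : Int) (Ss : List String) (LA LB adj : List Int) (PRE : List (List Int))
    (dp0A dp0B : List Int)
    (hN1 : 1 ≤ N)
    (hLB : LB = LA)
    (hLlen : LA.length = N.toNat)
    (hdp0B : dp0B = dp0A)
    (hdp0len : dp0A.length = N.toNat)
    (hadj : ∀ t : Int, 0 ≤ t → t + 1 < N →
      PySem.List.pyGetD adj t 0 =
        ((lcpLenC (PySem.List.pyGetD Ss t "").toList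
            (PySem.List.pyGetD Ss (t + 1) "").toList : Nat) : Int))
    (hpre : ∀ i j : Int, 0 ≤ i → i < j → j < N →
      matGet PRE i j =
        ((lcpLenC (PySem.List.pyGetD Ss i "").toList
            (PySem.List.pyGetD Ss j "").toList : Nat) : Int))
    (hstep : ∀ i t : Int, 0 ≤ i → i < t → t + 1 < N →
      min ((lcpLenC (PySem.List.pyGetD Ss i "").toList
              (PySem.List.pyGetD Ss t "").toList : Nat) : Int)
          ((lcpLenC (PySem.List.pyGetD Ss t "").toList
              (PySem.List.pyGetD Ss (t + 1) "").toList : Nat) : Int)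
        = ((lcpLenC (PySem.List.pyGetD Ss i "").toList
              (PySem.List.pyGetD Ss (t + 1) "").toList : Nat) : Int)) :
    ((PySem.List.pyRange 1 K 1).foldl (fun (st : List Int × List Int) k =>
        ((PySem.List.pyRange (N - 1 - k) (-1) (-1)).foldl (fun ndp i =>
            (PySem.List.pyRange (i + 1) N 1).foldl (fun ndp j =>
              PySem.List.pySetD ndp i
                (min (PySem.List.pyGetD ndp i 0)
                  (PySem.List.pyGetD st.1 j 0 + 2 * PySem.List.pyGetD LA i 0
                    - 2 * matGet PRE i j))) ndp)
          ((PySem.List.pyRange 0 N 1).foldl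
            (fun ndp i => PySem.List.pySetD ndp i (10 ^ 18 : Int)) st.2),
         st.1))
      (dp0A, List.replicate N.toNat (10 ^ 18 : Int))).1
    = (PySem.List.pyRange 1 K 1).foldl (fun (dp : List Int) k =>
        (PySem.List.pyRange 0 N 1).foldl (fun ndp i =>
          ndp ++ [if i ≤ N - 1 - k then
              ((PySem.List.pyRange (i + 1) N 1).foldl
                (fun (vm : Int × Int) j =>
                  (if PySem.List.pyGetD dp j 0 + 2 * PySem.List.pyGetD LB i 0
                      - 2 * vm.2 < vm.1 then
                     PySem.List.pyGetD dp j 0 + 2 * PySem.List.pyGetD LB i 0 - 2 * vm.2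
                   else vm.1,
                   if j < N - 1 then
                     (if PySem.List.pyGetD adj j 0 < vm.2 then PySem.List.pyGetD adj j 0
                      else vm.2)
                   else vm.2))
                ((10 ^ 18 : Int), PySem.List.pyGetD adj i 0)).1
            else (10 ^ 18 : Int)]) []) dp0B := by
  subst hLB hdp0B
  refine (foldl_rel
    (fun (stA : List Int × List Int) (dpB : List Int) =>
      stA.1 = dpB ∧ stA.1.length = N.toNat ∧ stA.2.length = N.toNat) _ _
    (PySem.List.pyRange 1 K 1) _ _
    ⟨rfl, hdp0len, by simp⟩ ?_).1
  intro k hk stA dpB hR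
  obtain ⟨hdpeq, hlen1, hlen2⟩ := hR
  have hk1 : 1 ≤ k := (PySem.List.mem_pyRange_one.mp hk).1
  subst hdpeq
  -- reset pass
  obtain ⟨hrl, hrg⟩ := reset_char (10 ^ 18 : Int) N N.toNat 0 stA.2 (by omega) (by omega) hlen2
  -- descending pass
  obtain ⟨hdl, hdg⟩ := desc_char N (N - 1 - k)
    (fun i j => PySem.List.pyGetD stA.1 j 0 + 2 * PySem.List.pyGetD LB i 0 - 2 * matGet PRE i j)
    (by omega) (N - 1 - k + 1).toNat (N - 1 - k)
    ((PySem.List.pyRange 0 N 1).foldl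
      (fun ndp i => PySem.List.pySetD ndp i (10 ^ 18 : Int)) stA.2)
    (le_refl _) (le_refl _) hrl
    (by
      intro idx hidx
      rw [hrg idx hidx, if_pos (by omega)]
      by_cases h1 : N - 1 - k < (idx : Int)
      · rw [if_pos h1, if_neg (by omega)]
      · rw [if_neg h1])
  refine ⟨?_, ?_, ?_⟩
  · -- the computed ndp lists agree
    dsimp only
    rw [PySem.List.foldl_append_singleton_eq_map
      (f := fun i => if i ≤ N - 1 - k then
          ((PySem.List.pyRange (i + 1) N 1).foldl
            (fun (vm : Int × Int) j =>
              (if PySem.List.pyGetD stA.1 j 0 + 2 * PySem.List.pyGetD LB i 0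
                  - 2 * vm.2 < vm.1 then
                 PySem.List.pyGetD stA.1 j 0 + 2 * PySem.List.pyGetD LB i 0 - 2 * vm.2
               else vm.1,
               if j < N - 1 then
                 (if PySem.List.pyGetD adj j 0 < vm.2 then PySem.List.pyGetD adj j 0
                  else vm.2)
               else vm.2))
            ((10 ^ 18 : Int), PySem.List.pyGetD adj i 0)).1
        else (10 ^ 18 : Int)), List.nil_append]
    apply List.ext_getElem
    · rw [hdl, List.length_map, PySem.List.length_pyRange_one]
      omega
    · intro idx hidx1 hidx2
      have hidxn : idx < N.toNat := by rwa [hdl] at hidx1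
      rw [List.getElem_map, PySem.List.getElem_pyRange_one 0 N idx
        (by rw [PySem.List.length_pyRange_one]; omega), zero_add,
        List.getElem_eq_getD (fallback := 0), hdg idx hidxn]
      by_cases hcase : (idx : Int) ≤ N - 1 - k
      · rw [if_pos hcase, if_pos hcase]
        exact (inner_AB N (idx : Int)
          (fun j => PySem.List.pyGetD stA.1 j 0 + 2 * PySem.List.pyGetD LB (idx : Int) 0)
          (fun j => matGet PRE (idx : Int) j)
          (fun j => PySem.List.pyGetD adj j 0)
          (fun i j => ((lcpLenC (PySem.List.pyGetD Ss i "").toList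
              (PySem.List.pyGetD Ss j "").toList : Nat) : Int))
          (fun j hj1 hj2 => hpre (idx : Int) j (by omega) hj1 hj2)
          (fun t ht1 ht2 => hadj t (by omega) ht2)
          (fun t ht1 ht2 => hstep (idx : Int) t (by omega) ht1 ht2)
          (N - ((idx : Int) + 1)).toNat ((idx : Int) + 1) (10 ^ 18 : Int)
          (PySem.List.pyGetD adj (idx : Int) 0)
          (le_refl _) (by omega)
          (fun h => hadj (idx : Int) (by omega) (by omega))).symm
      · rw [if_neg hcase, if_neg hcase]
  · dsimp only
    rw [hdl]
  · exact hlen1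


-- ===== VERDICT (by name: the statement is the Claim_ definition above) =====
theorem solve_spec : Claim_equal_solve := by
  intro N K S _hDom hPre
  obtain ⟨hN1, hNlen⟩ := hPre
  show solve N K S = solve_alt N K S
  have hlenSs : (PySem.List.sorted S (fun x => x) false).length = S.length := PySem.List.length_sorted S (fun x => x) false
  have hLlen : ((PySem.List.pyRange 0 N 1).map (fun i => PySem.Str.len (PySem.List.pyGetD (PySem.List.sorted S (fun x => x) false) i ""))).length = N.toNat := by
    rw [List.length_map, PySem.List.length_pyRange_one]; omega
  have hLB : ((PySem.List.slice (PySem.List.sorted S (fun x => x) false) none (some N)).map PySem.Str.len) = ((PySem.List.pyRange 0 N 1).map (fun i => PySem.Str.len (PySem.List.pyGetD (PySem.List.sorted S (fun x => x) false) i ""))) := by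
    rw [PySem.List.slice_to _ (by omega : (0 : Int) ≤ N)]
    exact (map_pyRange_getD_eq_map_take (PySem.List.sorted S (fun x => x) false) PySem.Str.len "" N (by omega) (by omega)).symm
  have hdp0len : ((PySem.List.pyRange 0 N 1).map (fun i => 2 * PySem.List.pyGetD ((PySem.List.pyRange 0 N 1).map (fun i => PySem.Str.len (PySem.List.pyGetD (PySem.List.sorted S (fun x => x) false) i ""))) i 0)).length = N.toNat := by
    rw [List.length_map, PySem.List.length_pyRange_one]; omega
  have hdp0B : (((PySem.List.slice (PySem.List.sorted S (fun x => x) false) none (some N)).map PySem.Str.len).map (fun l => 2 * l)) = ((PySem.List.pyRange 0 N 1).map (fun i => 2 * PySem.List.pyGetD ((PySem.List.pyRange 0 N 1).map (fun i => PySem.Str.len (PySem.List.pyGetD (PySem.List.sorted S (fun x => x) false) i ""))) i 0)) := by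
    rw [hLB]
    exact (map_pyRange_getD_eq_map_double ((PySem.List.pyRange 0 N 1).map (fun i => PySem.Str.len (PySem.List.pyGetD (PySem.List.sorted S (fun x => x) false) i ""))) N (by omega) hLlen).symm
  have hadj : ∀ t : Int, 0 ≤ t → t + 1 < N →
      PySem.List.pyGetD ((PySem.List.pyRange 0 (N - 1) 1).map (fun t => ((lcpLenC (PySem.List.pyGetD (PySem.List.sorted S (fun x => x) false) t "").toList (PySem.List.pyGetD (PySem.List.sorted S (fun x => x) false) (t + 1) "").toList : Nat) : Int))) t 0 =
        ((lcpLenC (PySem.List.pyGetD (PySem.List.sorted S (fun x => x) false) t "").toList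
            (PySem.List.pyGetD (PySem.List.sorted S (fun x => x) false) (t + 1) "").toList : Nat) : Int) := by
    intro t ht0 ht1
    exact PySem.List.pyGetD_map_pyRange_of_nonneg _ (N - 1) t 0 ht0 (by omega)
  have hsh0 : Shape ((PySem.List.pyRange 0 N 1).map (fun _ => List.replicate N.toNat (0 : Int))) N.toNat := by
    constructor
    · rw [List.length_map, PySem.List.length_pyRange_one]; omega
    · intro r hr
      obtain ⟨_, _, hr2⟩ := List.mem_map.mp hr
      rw [← hr2, List.length_replicate]
  obtain ⟨_, hp⟩ := outer_fold (fun i j => ((lcpLenC (PySem.List.pyGetD (PySem.List.sorted S (fun x => x) false) i "").toList (PySem.List.pyGetD (PySem.List.sorted S (fun x => x) false) j "").toList : Nat) : Int)) N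
    (fun i j => congrArg Nat.cast (lcpLenC_comm _ _)) N.toNat 0 ((PySem.List.pyRange 0 N 1).map (fun _ => List.replicate N.toNat (0 : Int)))
    (by omega) (by omega) hsh0
    (fun p q hp' hq' hne hlt => absurd hlt (by omega))
  have hpre : ∀ i j : Int, 0 ≤ i → i < j → j < N →
      matGet ((PySem.List.pyRange 0 N 1).foldl (fun m i => (PySem.List.pyRange (i + 1) N 1).foldl (fun m j => matSet (matSet m i j ((lcpLenC (PySem.List.pyGetD (PySem.List.sorted S (fun x => x) false) i "").toList (PySem.List.pyGetD (PySem.List.sorted S (fun x => x) false) j "").toList : Nat) : Int)) j i ((lcpLenC (PySem.List.pyGetD (PySem.List.sorted S (fun x => x) false) i "").toList (PySem.List.pyGetD (PySem.List.sorted S (fun x => x) false) j "").toList : Nat) : Int)) m) ((PySem.List.pyRange 0 N 1).map (fun _ => List.replicate N.toNat (0 : Int)))) i j =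
        ((lcpLenC (PySem.List.pyGetD (PySem.List.sorted S (fun x => x) false) i "").toList
            (PySem.List.pyGetD (PySem.List.sorted S (fun x => x) false) j "").toList : Nat) : Int) := by
    intro i j h0 hij hjN
    rw [matGet_eq_natGet _ _ _ (by omega) (by omega)]
    have h := hp i.toNat j.toNat (by omega) (by omega) (by omega)
    simp only [Int.toNat_of_nonneg h0, Int.toNat_of_nonneg (by omega : (0 : Int) ≤ j)] at h
    exact h
  have hstep : ∀ i t : Int, 0 ≤ i → i < t → t + 1 < N →
      min ((lcpLenC (PySem.List.pyGetD (PySem.List.sorted S (fun x => x) false) i "").toList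
              (PySem.List.pyGetD (PySem.List.sorted S (fun x => x) false) t "").toList : Nat) : Int)
          ((lcpLenC (PySem.List.pyGetD (PySem.List.sorted S (fun x => x) false) t "").toList
              (PySem.List.pyGetD (PySem.List.sorted S (fun x => x) false) (t + 1) "").toList : Nat) : Int)
        = ((lcpLenC (PySem.List.pyGetD (PySem.List.sorted S (fun x => x) false) i "").toList
              (PySem.List.pyGetD (PySem.List.sorted S (fun x => x) false) (t + 1) "").toList : Nat) : Int) :=
    fun i t h0 h1 h2 => sorted_lcp_step S N hNlen i t h0 h1 h2
  exact congrArg (fun dp => (PySem.List.min? dp (fun x => x)).getD 0 + K)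
    (core_eq N K (PySem.List.sorted S (fun x => x) false) ((PySem.List.pyRange 0 N 1).map (fun i => PySem.Str.len (PySem.List.pyGetD (PySem.List.sorted S (fun x => x) false) i ""))) ((PySem.List.slice (PySem.List.sorted S (fun x => x) false) none (some N)).map PySem.Str.len) ((PySem.List.pyRange 0 (N - 1) 1).map (fun t => ((lcpLenC (PySem.List.pyGetD (PySem.List.sorted S (fun x => x) false) t "").toList (PySem.List.pyGetD (PySem.List.sorted S (fun x => x) false) (t + 1) "").toList : Nat) : Int))) ((PySem.List.pyRange 0 N 1).foldl (fun m i => (PySem.List.pyRange (i + 1) N 1).foldl (fun m j => matSet (matSet m i j ((lcpLenC (PySem.List.pyGetD (PySem.List.sorted S (fun x => x) false) i "").toList (PySem.List.pyGetD (PySem.List.sorted S (fun x => x) false) j "").toList : Nat) : Int)) j i ((lcpLenC (PySem.List.pyGetD (PySem.List.sorted S (fun x => x) false) i "").toList (PySem.List.pyGetD (PySem.List.sorted S (fun x => x) false) j "").toList : Nat) : Int)) m) ((PySem.List.pyRange 0 N 1).map (fun _ => List.replicate N.toNat (0 : Int)))) ((PySem.List.pyRange 0 N 1).map (fun i => 2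 * PySem.List.pyGetD ((PySem.List.pyRange 0 N 1).map (fun i => PySem.Str.len (PySem.List.pyGetD (PySem.List.sorted S (fun x => x) false) i ""))) i 0)) (((PySem.List.slice (PySem.List.sorted S (fun x => x) false) none (some N)).map PySem.Str.len).map (fun l => 2 * l))
      hN1 hLB hLlen hdp0B hdp0len hadj hpre hstep)
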